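-- pv_equiv track=rewrite | github.com/h3ct0rjs/ProgrammingContest | HackerRank/Training/Python/findbug.py | findTheBug
-- ===== SOURCE A (Python) =====
-- def findTheBug(grid):
--     r=[i for i in range(len(grid)) if 'X' in grid[i]]
--     k=r[0]
--     c=0
--     for x in grid[k]:
--         if x == 'X':
--             break
--         else:
--             c+=1
--     return [k,c]
-- ===== SOURCE B (Python) =====
-- def findTheBug(grid):
--     for i, row in enumerate(grid):
--         for j, ch in enumerate(row):
--             if ch == 'X':
--                 return [i, j]
--     raise IndexError('list index out of range')
-- ===== Notes on version B (the rewrite author's own statement) =====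
-- stated objective: simpler
-- what changed: Replaces the two-stage approach (build the full list of all matching row indices, then a second counting loop over the chosen row) by one nested scan over cells that returns at the first 'X'.
-- outside the precondition, e.g. on findTheBug(['..', '..']): A raises IndexError, B raises IndexError
import Mathlib
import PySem

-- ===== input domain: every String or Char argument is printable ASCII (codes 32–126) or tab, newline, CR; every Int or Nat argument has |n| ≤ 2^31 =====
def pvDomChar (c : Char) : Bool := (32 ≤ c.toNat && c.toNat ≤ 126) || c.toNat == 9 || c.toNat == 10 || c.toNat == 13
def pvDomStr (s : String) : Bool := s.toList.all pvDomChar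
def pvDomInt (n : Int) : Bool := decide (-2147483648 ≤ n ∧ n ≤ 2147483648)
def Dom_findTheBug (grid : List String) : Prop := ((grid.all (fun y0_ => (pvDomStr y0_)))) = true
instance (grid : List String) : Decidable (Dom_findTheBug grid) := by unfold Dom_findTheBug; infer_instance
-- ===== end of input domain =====

-- B is a single nested scan over cells returning at the first 'X' (simpler decomposition);
-- A builds the full list of matching row indices, then counts in a second loop.
-- Both raise IndexError on a grid with no 'X'; Pre_ excludes exactly those grids.

-- ===== PORT A =====
-- loop body of A's counting loop (c += 1 until the first 'X'; the Bool is Python's 'break')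
def findTheBugStep (st : Bool × Int) (x : Char) : Bool × Int :=
  if st.1 then st else if x == 'X' then (true, st.2) else (false, st.2 + 1)

def findTheBug (grid : List String) : List Int :=
  let r : List Int := (PySem.List.pyRange 0 grid.length 1).filter
      (fun i => PySem.Str.isIn "X" (PySem.List.pyGetD grid i ""))
  match PySem.List.pyGet? r 0 with
  | none => []   -- Python: IndexError at r[0]; excluded by Pre_
  | some k =>
    let c : Int := ((PySem.List.pyGetD grid k "").toList.foldl findTheBugStep (false, 0)).2
    [k, c]

-- ===== PORT B =====
-- inner loop: for j, ch in enumerate(row): if ch == 'X': return [i, j]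
def findTheBugRow (j : Int) : List Char → Option Int
  | [] => none
  | c :: cs => if c == 'X' then some j else findTheBugRow (j + 1) cs

-- outer loop: for i, row in enumerate(grid)
def findTheBugGo (i : Int) : List String → List Int
  | [] => []   -- Python: raise IndexError; excluded by Pre_
  | row :: rest =>
    match findTheBugRow 0 row.toList with
    | some j => [i, j]
    | none => findTheBugGo (i + 1) rest

def findTheBug_alt (grid : List String) : List Int := findTheBugGo 0 grid

-- ===== PRECONDITION & SPEC =====
-- A raises IndexError (r[0] on an empty list) exactly when no row contains 'X'; B raises there too.
def Pre_findTheBug (grid : List String) : Prop :=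
  ∃ row ∈ grid, PySem.Str.isIn "X" row = true
instance (grid : List String) : Decidable (Pre_findTheBug grid) := by
  unfold Pre_findTheBug; infer_instance

def pvWitness_findTheBug : List String := ["..", ".X"]

def Spec_findTheBug (grid : List String) (out : List Int) : Prop := out = findTheBug_alt grid
instance (grid : List String) (out : List Int) : Decidable (Spec_findTheBug grid out) := by
  unfold Spec_findTheBug; infer_instance

-- ===== CLAIM (what is proved, stated in full; the proofs are below) =====
def Claim_equal_findTheBug : Prop :=
  ∀ (grid : List String), Dom_findTheBug grid → Pre_findTheBug grid →
    Spec_findTheBug grid (findTheBug grid)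

-- ===== LEMMAS AND PROOFS =====

-- 'X' in row  ↔  'X' is a member of its character list
theorem isIn_X_iff (row : String) :
    PySem.Str.isIn "X" row = true ↔ 'X' ∈ row.toList := by
  rw [PySem.Str.isIn_iff_infix]
  constructor
  · intro h
    exact (List.singleton_sublist).1 h.sublist
  · intro h
    obtain ⟨l1, l2, hl⟩ := List.append_of_mem h
    exact ⟨l1, l2, by simp [hl]⟩

-- once broken, A's fold keeps the state
theorem foldA_true (cs : List Char) (st : Int) :
    cs.foldl findTheBugStep (true, st) = (true, st) := by
  induction cs with
  | nil => rfl
  | cons d ds ih =>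
    rw [List.foldl_cons, show findTheBugStep (true, st) d = (true, st) from rfl]
    exact ih

-- A's break-counting fold, fully characterised by the first index of 'X'
theorem foldA_char (cs : List Char) (acc : Int) :
    cs.foldl findTheBugStep (false, acc)
    = match PySem.List.index? cs 'X' with
      | some n => (true, acc + n)
      | none => (false, acc + cs.length) := by
  induction cs generalizing acc with
  | nil =>
    rw [show PySem.List.index? ([] : List Char) 'X' = none from
      (PySem.List.index?_eq_none_iff _ _).2 (by simp)]
    simp
  | cons c cs ih =>
    by_cases hc : c = 'X'
    · subst hc
      rw [PySem.List.index?_cons_self, List.foldl_cons,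
        show findTheBugStep (false, acc) 'X' = (true, acc) from rfl, foldA_true]
      simp
    · rw [PySem.List.index?_cons_of_ne _ hc, List.foldl_cons,
        show findTheBugStep (false, acc) c = (false, acc + 1) from by
          simp [findTheBugStep, hc],
        ih]
      cases h : PySem.List.index? cs 'X' with
      | none => simp; omega
      | some n => simp; omega

-- B's inner scan, characterised by the same first index
theorem rowB_char (cs : List Char) (j : Int) :
    findTheBugRow j cs = (PySem.List.index? cs 'X').map (fun n => j + n) := by
  induction cs generalizing j with
  | nil =>
    rw [show PySem.List.index? ([] : List Char) 'X' = none from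
      (PySem.List.index?_eq_none_iff _ _).2 (by simp)]
    rfl
  | cons c cs ih =>
    by_cases hc : c = 'X'
    · subst hc
      rw [PySem.List.index?_cons_self]
      simp [findTheBugRow]
    · rw [PySem.List.index?_cons_of_ne _ hc]
      rw [show findTheBugRow j (c :: cs) = findTheBugRow (j + 1) cs from by
        simp [findTheBugRow, hc], ih]
      cases h : PySem.List.index? cs 'X' with
      | none => rfl
      | some n => simp; omega

-- head of A's filtered index list = findIdx? of the row predicate
theorem filterRange_head (grid : List String) :
    (((List.range grid.length).filter
        (fun i => PySem.Str.isIn "X" (grid.getD i ""))).head?)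
    = ((grid.findIdx? (fun row => PySem.Str.isIn "X" row))) := by
  induction grid with
  | nil => simp
  | cons row rest ih =>
    rw [List.length_cons, List.range_succ_eq_map, List.filter_cons, List.findIdx?_cons]
    by_cases h : PySem.Str.isIn "X" row = true
    · rw [if_pos (by simpa using h), if_pos h]
      simp
    · rw [if_neg (by simpa using h), if_neg h, List.filter_map, List.head?_map]
      have hstep : ∀ i : Nat, ((row :: rest).getD (Nat.succ i) "") = rest.getD i "" := by
        intro i; rfl
      have : ((List.range rest.length).filter
          (fun i => PySem.Str.isIn "X" ((row :: rest).getD (Nat.succ i) ""))).head?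
          = (rest.findIdx? (fun r => PySem.Str.isIn "X" r)) := by
        simp only [hstep]; exact ih
      rw [show ((fun i => PySem.Str.isIn "X" ((row :: rest).getD i "")) ∘ Nat.succ)
          = (fun i => PySem.Str.isIn "X" ((row :: rest).getD (Nat.succ i) "")) from rfl, this]

-- B's outer loop, given the first matching row index
theorem goB_char (grid : List String) (i0 : Int) (k : Nat)
    (hk : grid.findIdx? (fun row => PySem.Str.isIn "X" row) = some k) :
    findTheBugGo i0 grid
      = [i0 + k, ((PySem.List.index? ((grid.getD k "").toList) 'X').getD 0 : Nat)] := by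
  induction grid generalizing i0 k with
  | nil => simp at hk
  | cons row rest ih =>
    rw [List.findIdx?_cons] at hk
    by_cases h : PySem.Str.isIn "X" row = true
    · rw [if_pos h] at hk
      obtain rfl : k = 0 := by simpa using hk.symm
      have hmem : 'X' ∈ row.toList := (isIn_X_iff row).1 h
      obtain ⟨n, hn⟩ := Option.isSome_iff_exists.1 ((PySem.List.index?_isSome_iff _ _).2 hmem)
      have hr := rowB_char row.toList 0
      rw [hn] at hr
      rw [show findTheBugGo i0 (row :: rest)
            = (match findTheBugRow 0 row.toList with
               | some j => [i0, j]
               | none => findTheBugGo (i0 + 1) rest) from rfl, hr]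
      simp only [List.getD_cons_zero, hn, Option.getD_some]
      norm_num
    · rw [if_neg h] at hk
      obtain ⟨k', rfl, hk'⟩ : ∃ k', k = k' + 1 ∧
          rest.findIdx? (fun row => PySem.Str.isIn "X" row) = some k' := by
        cases hfi : rest.findIdx? (fun row => PySem.Str.isIn "X" row) with
        | none => rw [hfi] at hk; simp at hk
        | some k' => rw [hfi] at hk; simp at hk; exact ⟨k', hk.symm, rfl⟩
      have hrow : findTheBugRow 0 row.toList = none := by
        rw [rowB_char]
        have hnm : 'X' ∉ row.toList := fun hm => h ((isIn_X_iff row).2 hm)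
        rw [(PySem.List.index?_eq_none_iff _ _).2 hnm]; rfl
      rw [show findTheBugGo i0 (row :: rest)
            = (match findTheBugRow 0 row.toList with
               | some j => [i0, j]
               | none => findTheBugGo (i0 + 1) rest) from rfl, hrow]
      rw [ih (i0 + 1) k' hk', List.getD_cons_succ]
      have : i0 + 1 + (k' : Int) = i0 + ((k' : Int) + 1) := by ring
      rw [this]
      push_cast
      rfl

-- ===== VERDICT (by name: the statement is the Claim_ definition above) =====
theorem findTheBug_spec : Claim_equal_findTheBug := by
  intro grid _hdom hpre
  obtain ⟨row, hmem, hrow⟩ := hpre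
  have hsome : (grid.findIdx? (fun row => PySem.Str.isIn "X" row)).isSome = true := by
    rw [List.findIdx?_isSome]
    exact List.any_eq_true.2 ⟨row, hmem, hrow⟩
  obtain ⟨k, hk⟩ := Option.isSome_iff_exists.1 hsome
  unfold Spec_findTheBug findTheBug findTheBug_alt
  have hr : (PySem.List.pyRange 0 grid.length 1).filter
        (fun i => PySem.Str.isIn "X" (PySem.List.pyGetD grid i ""))
      = ((List.range grid.length).filter
          (fun i => PySem.Str.isIn "X" (grid.getD i ""))).map (Nat.cast : Nat → Int) := by
    rw [PySem.List.pyRange_one]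
    simp only [sub_zero, Int.toNat_natCast, zero_add, List.filter_map]
    congr 1
    apply List.filter_congr
    intro i hi
    simp only [Function.comp_apply]
    rw [PySem.List.pyGetD_natCast]
  rw [hr]
  have hhead := filterRange_head grid
  rw [hk] at hhead
  have hget : PySem.List.pyGet? (((List.range grid.length).filter
      (fun i => PySem.Str.isIn "X" (grid.getD i ""))).map (Nat.cast : Nat → Int)) 0
      = some (k : Int) := by
    cases hl : (List.range grid.length).filter (fun i => PySem.Str.isIn "X" (grid.getD i "")) with
    | nil => rw [hl] at hhead; simp at hhead
    | cons a l =>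
      rw [hl] at hhead; simp at hhead
      simp [PySem.List.pyGet?, PySem.List.pyIdx?, hhead]
  simp only [hget]
  -- row k has an 'X'
  have hkrow : PySem.Str.isIn "X" (grid.getD k "") = true := by
    have h1 := List.findIdx?_eq_some_iff_findIdx_eq.1 hk
    have hlt : k < grid.length := h1.1
    have hw : grid.findIdx (fun row => PySem.Str.isIn "X" row) < grid.length := by
      rw [h1.2]; exact hlt
    have h2 := List.findIdx_getElem (w := hw)
    simp only [h1.2] at h2
    rw [List.getD_eq_getElem _ _ hlt]
    simpa using h2
  have hmemk : 'X' ∈ (grid.getD k "").toList := (isIn_X_iff _).1 hkrow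
  obtain ⟨n, hn⟩ := Option.isSome_iff_exists.1 ((PySem.List.index?_isSome_iff _ _).2 hmemk)
  have hfold := foldA_char (grid.getD k "").toList 0
  rw [hn] at hfold
  have hB := goB_char grid 0 k hk
  rw [hB, PySem.List.pyGetD_natCast]
  simp only [hfold, hn]
  simp
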